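-- pv_equiv track=rewrite | github.com/limosnd/Taller-2AA | Taller 2 AA.py | CB
-- ===== SOURCE A (Python) =====
-- def CB(X, b, e):
--     if e < b:
--         return []
--     else:
--         q = (b + e) // 2
--         d = (X // (2 ** q)) % 2
--         l = CB(X, b, q - 1)
--         h = CB(X, q + 1, e)
--         return h + [d] + l
-- ===== SOURCE B (Python) =====
-- def CB(X, b, e):
--     # One linear pass over bit positions e..b (MSB first), instead of divide-and-conquer.
--     return [(X >> i) % 2 for i in range(e, b - 1, -1)]
-- ===== Notes on version B (the rewrite author's own statement) =====
-- stated objective: simpler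
-- what changed: Replaced the divide-and-conquer recursion (which splits the position range at its midpoint and concatenates sublists) by a single list comprehension that extracts each bit of X at positions e down to b with one shift per position.
-- outside the precondition, e.g. on CB(5, -2, 2): A returns [1, 0, 1, 0.0, 0.0], B raises ValueError
import Mathlib
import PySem

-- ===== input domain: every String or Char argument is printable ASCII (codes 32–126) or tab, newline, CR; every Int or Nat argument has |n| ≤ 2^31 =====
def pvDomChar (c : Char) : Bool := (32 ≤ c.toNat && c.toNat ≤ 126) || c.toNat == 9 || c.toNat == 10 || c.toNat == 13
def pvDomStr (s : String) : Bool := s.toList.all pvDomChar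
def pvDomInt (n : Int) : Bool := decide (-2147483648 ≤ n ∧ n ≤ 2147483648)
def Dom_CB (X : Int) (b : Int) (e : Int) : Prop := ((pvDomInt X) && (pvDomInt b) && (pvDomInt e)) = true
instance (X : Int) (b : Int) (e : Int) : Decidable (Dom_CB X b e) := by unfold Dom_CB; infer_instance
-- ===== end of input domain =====

-- B replaces A's divide-and-conquer recursion by one linear pass over bit positions e..b: plainer and shorter.

-- ===== PORT A =====
-- 2 ** q is ported as 2 ^ q.toNat: exact for q ≥ 0, which holds on all recursive calls inside Pre_CB
-- (for q < 0 Python's 2 ** q is a float and A's result leaves the declared type; Pre_CB excludes those inputs).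
def CB (X : Int) (b : Int) (e : Int) : List Int :=
  if e < b then []
  else
    let q := PySem.Int.floordiv (b + e) 2
    let d := PySem.Int.mod (PySem.Int.floordiv X (2 ^ q.toNat)) 2
    let l := CB X b (q - 1)
    let h := CB X (q + 1) e
    h ++ [d] ++ l
termination_by (e - b + 1).toNat
decreasing_by
  all_goals
    have := PySem.Int.floordiv_two_mid_bounds (show b ≤ e by omega)
    omega

-- ===== PORT B =====
-- X >> i is core Lean's X >>> i (exact per PySem; i ≥ 0 for every position inside Pre_CB).
def CB_alt (X : Int) (b : Int) (e : Int) : List Int :=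
  (PySem.List.pyRange e (b - 1) (-1)).map (fun i => PySem.Int.mod (X >>> i.toNat) 2)

-- ===== PRECONDITION & SPEC =====
-- Pre_CB excludes inputs with b < 0 ≤ e - b (nonempty range starting below 0): there Python's 2 ** q eventually has q < 0,
-- so A returns a list containing floats (not ints) and B raises ValueError on the negative shift.
def Pre_CB (_X : Int) (b : Int) (e : Int) : Prop := e < b ∨ 0 ≤ b
instance (X : Int) (b : Int) (e : Int) : Decidable (Pre_CB X b e) := by unfold Pre_CB; infer_instance
def pvWitness_CB : Int × Int × Int := (13, 0, 3)

def Spec_CB (X : Int) (b : Int) (e : Int) (out : List Int) : Prop := out = CB_alt X b e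
instance (X : Int) (b : Int) (e : Int) (out : List Int) : Decidable (Spec_CB X b e out) := by unfold Spec_CB; infer_instance

-- ===== CLAIM (what is proved, stated in full; the proofs are below) =====
def Claim_equal_CB : Prop := ∀ (X : Int) (b : Int) (e : Int), Dom_CB X b e → Pre_CB X b e → Spec_CB X b e (CB X b e)

-- ===== LEMMAS AND PROOFS =====

-- the bit A extracts at position q equals the bit B extracts there (q ≥ 0)
lemma bit_eq (X q : Int) :
    PySem.Int.mod (PySem.Int.floordiv X (2 ^ q.toNat)) 2 =
      PySem.Int.mod (X >>> ((q.toNat : Int))) 2 := by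
  have h2 : (0 : Int) < 2 ^ q.toNat := by positivity
  rw [Int.shiftRight_natCast_right, PySem.Int.floordiv_eq_ediv_of_pos h2,
    Int.shiftRight_eq_div_pow]
  norm_cast

-- splitting B's countdown range at an interior point q
lemma range_split (b q e : Int) (h1 : b ≤ q) (h2 : q ≤ e) :
    PySem.List.pyRange e (b - 1) (-1) =
      PySem.List.pyRange e q (-1) ++ [q] ++ PySem.List.pyRange (q - 1) (b - 1) (-1) := by
  rw [PySem.List.pyRange_neg_one_eq_reverse, PySem.List.pyRange_neg_one_eq_reverse,
      PySem.List.pyRange_neg_one_eq_reverse]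
  have e1 : PySem.List.pyRange (b - 1 + 1) (e + 1) 1 =
      PySem.List.pyRange (b - 1 + 1) q 1 ++ PySem.List.pyRange q (e + 1) 1 :=
    PySem.List.pyRange_one_append _ _ _ (by omega) (by omega)
  have e2 : PySem.List.pyRange q (e + 1) 1 =
      PySem.List.pyRange q (q + 1) 1 ++ PySem.List.pyRange (q + 1) (e + 1) 1 :=
    PySem.List.pyRange_one_append _ _ _ (by omega) (by omega)
  rw [e1, e2, PySem.List.pyRange_one_singleton]
  simp [List.reverse_append]

lemma CB_eq (X b e : Int) (h : e < b ∨ 0 ≤ b) : CB X b e = CB_alt X b e := by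
  rw [CB]
  by_cases hlt : e < b
  · simp only [if_pos hlt]
    unfold CB_alt
    rw [PySem.List.pyRange_neg_one_eq_nil (by omega)]
    simp
  · have hbe : b ≤ e := by omega
    have hb : 0 ≤ b := by omega
    simp only [if_neg hlt]
    have hmid := PySem.Int.floordiv_two_mid_bounds hbe
    set q := PySem.Int.floordiv (b + e) 2 with hqdef
    have ih1 : CB X b (q - 1) = CB_alt X b (q - 1) := CB_eq X b (q - 1) (by omega)
    have ih2 : CB X (q + 1) e = CB_alt X (q + 1) e := CB_eq X (q + 1) e (by omega)
    rw [ih1, ih2]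
    unfold CB_alt
    have hq1 : q + 1 - 1 = q := by ring
    rw [hq1, range_split b q e (by omega) (by omega), bit_eq X q]
    simp only [List.map_append, List.map_cons, List.append_assoc,
      List.cons_append, List.nil_append]
termination_by (e - b + 1).toNat
decreasing_by
  all_goals
    have := PySem.Int.floordiv_two_mid_bounds (show b ≤ e by omega)
    omega

-- ===== VERDICT (by name: the statement is the Claim_ definition above) =====
theorem CB_spec : Claim_equal_CB := by
  intro X b e _ hpre
  unfold Spec_CB
  exact CB_eq X b e hpre
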